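-- pv_equiv track=rewrite | github.com/teqn99/coding-test-practice | test_practice/4rd_test/2.py | solution
-- ===== SOURCE A (Python) =====
-- def solution(diet, breakfast, lunch):
--     diet = list(diet)
--     food = list(set(breakfast + lunch))
--
--     for i in food:
--         if i not in diet:
--             return "CHEATER"
--         diet.remove(i)
--
--     diet.sort()
--     return "".join(diet)
-- ===== SOURCE B (Python) =====
-- def solution(diet, breakfast, lunch):
--     food = set(breakfast + lunch)
--     if not food <= set(diet):
--         return "CHEATER"
--     counts = {}
--     for c in diet:
--         counts[c] = counts.get(c, 0) + 1
--     for c in food: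
--         counts[c] = counts[c] - 1
--     return "".join(c * counts[c] for c in sorted(counts))
-- ===== Notes on version B (the rewrite author's own statement) =====
-- stated objective: alternative
-- what changed: A's per-food-item check-and-remove loop over the diet list (followed by a full sort of the remainder) is replaced by one bulk subset test plus a frequency table: count diet once, subtract one per distinct food item, and emit the sorted keys with their multiplicities.
import Mathlib
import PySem

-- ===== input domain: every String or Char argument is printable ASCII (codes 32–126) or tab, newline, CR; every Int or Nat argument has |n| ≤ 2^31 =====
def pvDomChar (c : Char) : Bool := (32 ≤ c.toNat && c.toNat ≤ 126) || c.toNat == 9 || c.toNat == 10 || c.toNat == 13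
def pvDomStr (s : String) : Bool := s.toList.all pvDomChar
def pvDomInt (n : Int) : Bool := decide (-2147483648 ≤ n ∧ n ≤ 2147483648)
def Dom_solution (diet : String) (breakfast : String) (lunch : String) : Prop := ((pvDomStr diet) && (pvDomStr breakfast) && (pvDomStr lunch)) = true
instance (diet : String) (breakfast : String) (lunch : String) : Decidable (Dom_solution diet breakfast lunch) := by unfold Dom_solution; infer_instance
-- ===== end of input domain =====

-- B replaces A's per-item membership-check-and-remove loop by one bulk subset test plus a
-- frequency table (count diet, subtract one per distinct food item, emit sorted keys with
-- multiplicities); objective: alternative.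

-- ===== PORT A =====
-- A's for-loop: the early `return "CHEATER"` is modelled as `none`;
-- `diet.remove(i)` is guarded by `i in diet`, so `remove?` never yields `none` here.
def solutionLoop (food : List Char) (diet : List Char) : Option (List Char) :=
  match food with
  | [] => some diet
  | i :: rest =>
    if i ∈ diet then
      match PySem.List.remove? diet i with
      | some d => solutionLoop rest d
      | none => none
    else none

def solution (diet : String) (breakfast : String) (lunch : String) : String :=
  let dietL := diet.toList
  let food : PySem.Set Char := PySem.Set.ofList (breakfast.toList ++ lunch.toList)
  match solutionLoop food dietL with
  | none => "CHEATER"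
  | some d => String.ofList (PySem.Chars.join [] ((PySem.List.sorted d (fun c => c)).map (fun c => [c])))

-- ===== PORT B =====
def solution_alt (diet : String) (breakfast : String) (lunch : String) : String :=
  let food : PySem.Set Char := PySem.Set.ofList (breakfast.toList ++ lunch.toList)
  if food.issubset (PySem.Set.ofList diet.toList) then
    -- counts[c] = counts.get(c, 0) + 1 over diet
    let counts := diet.toList.foldl (fun d c => d.insert c (d.getD c 0 + 1)) PySem.Dict.empty
    -- counts[c] = counts[c] - 1 over food; `counts[c]` is exact as getD here: every food
    -- item is a diet key by the subset test just taken
    let counts2 := food.foldl (fun d c => d.insert c (d.getD c 0 - 1)) counts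
    String.ofList (PySem.Chars.join []
      ((PySem.List.sorted counts2.keys (fun c => c)).map
        (fun c => PySem.List.pyRepeat [c] (counts2.getD c 0))))
  else "CHEATER"

-- ===== PRECONDITION & SPEC =====
def Spec_solution (diet : String) (breakfast : String) (lunch : String) (out : String) : Prop := out = solution_alt diet breakfast lunch
instance (diet : String) (breakfast : String) (lunch : String) (out : String) : Decidable (Spec_solution diet breakfast lunch out) := by unfold Spec_solution; infer_instance

-- ===== CLAIM (what is proved, stated in full; the proofs are below) =====
def Claim_equal_solution : Prop := ∀ (diet : String) (breakfast : String) (lunch : String), Dom_solution diet breakfast lunch → Spec_solution diet breakfast lunch (solution diet breakfast lunch)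

-- ===== LEMMAS AND PROOFS =====

-- A's loop returns CHEATER exactly when some food item is missing from diet
theorem solutionLoop_eq_none (food : List Char) (diet : List Char)
    (hnd : food.Nodup) (h : ¬ ∀ f ∈ food, f ∈ diet) :
    solutionLoop food diet = none := by
  induction food generalizing diet with
  | nil => exact absurd (by simp) h
  | cons i rest ih =>
    by_cases hi : i ∈ diet
    · rw [solutionLoop, if_pos hi, PySem.List.remove?_eq_some_erase diet i hi]
      apply ih _ hnd.of_cons
      intro hall
      apply h
      intro f hf
      rcases List.mem_cons.mp hf with rfl | hf'
      · exact hi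
      · have hfi : f ≠ i := fun e => (List.nodup_cons.mp hnd).1 (e ▸ hf')
        exact (List.mem_erase_of_ne hfi).mp (hall f hf')
    · rw [solutionLoop, if_neg hi]

-- A's loop result, characterised by its multiplicities
theorem solutionLoop_eq_some (food : List Char) (diet : List Char)
    (hnd : food.Nodup) (h : ∀ f ∈ food, f ∈ diet) :
    ∃ d, solutionLoop food diet = some d ∧
      ∀ c, d.count c = diet.count c - (if c ∈ food then 1 else 0) := by
  induction food generalizing diet with
  | nil => exact ⟨diet, rfl, by simp⟩
  | cons i rest ih =>
    have hi : i ∈ diet := h i (by simp)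
    have hrest : ∀ f ∈ rest, f ∈ diet.erase i := by
      intro f hf
      have hfi : f ≠ i := fun e => (List.nodup_cons.mp hnd).1 (e ▸ hf)
      exact (List.mem_erase_of_ne hfi).mpr (h f (by simp [hf]))
    obtain ⟨d, hd, hcnt⟩ := ih (diet.erase i) hnd.of_cons hrest
    refine ⟨d, ?_, ?_⟩
    · rw [solutionLoop, if_pos hi, PySem.List.remove?_eq_some_erase diet i hi]
      exact hd
    · intro c
      rw [hcnt c]
      by_cases hci : c = i
      · subst hci
        have hcr : c ∉ rest := (List.nodup_cons.mp hnd).1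
        simp [hcr, List.count_erase_self]
      · rw [List.count_erase_of_ne hci]
        simp [List.mem_cons, hci]

theorem set_update_of_subset (s : PySem.Set Char) (xs : List Char)
    (h : ∀ x ∈ xs, x ∈ s) : PySem.Set.update s xs = s := by
  induction xs generalizing s with
  | nil => rfl
  | cons x xs ih =>
    have hx : x ∈ s := h x (by simp)
    have hadd : PySem.Set.add s x = s := by
      simp [PySem.Set.add, PySem.Set.contains, hx]
    show PySem.Set.update (PySem.Set.add s x) xs = s
    rw [hadd]
    exact ih s (fun y hy => h y (by simp [hy]))

theorem getD_foldl_insert_sub_one (l : List Char) (d : PySem.Dict Char Int) (v : Char) :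
    (l.foldl (fun d x => d.insert x (d.getD x 0 - 1)) d).getD v 0 =
      d.getD v 0 - l.count v := by
  induction l generalizing d with
  | nil => simp
  | cons x l ih =>
    rw [List.foldl_cons, ih, PySem.Dict.getD_insert]
    by_cases hv : v = x
    · subst hv
      simp
      omega
    · have hxv : ¬ x = v := fun h => hv h.symm
      simp [hv, hxv]

theorem join_nil_eq_flatten (parts : List (List Char)) :
    PySem.Chars.join [] parts = parts.flatten := by
  induction parts with
  | nil => simp [PySem.Chars.join_nil]
  | cons p parts ih =>
    cases parts with
    | nil => simp [PySem.Chars.join_singleton]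
    | cons q rest => simp [PySem.Chars.join_cons_cons, ih]

theorem count_flatMap_replicate (K : List Char) (m : Char → Nat) (hnd : K.Nodup) (c : Char) :
    (K.flatMap (fun k => List.replicate (m k) k)).count c =
      if c ∈ K then m c else 0 := by
  induction K with
  | nil => simp
  | cons k K ih =>
    simp only [List.flatMap_cons, List.count_append, List.count_replicate]
    rw [ih hnd.of_cons]
    by_cases hck : c = k
    · subst hck
      have : c ∉ K := (List.nodup_cons.mp hnd).1
      simp [this]
    · simp [hck, List.mem_cons]
      intro h
      exact absurd h.symm hck

theorem pairwise_flatMap_replicate (K : List Char) (m : Char → Nat)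
    (h : K.Pairwise (· < ·)) :
    (K.flatMap (fun k => List.replicate (m k) k)).Pairwise (· ≤ ·) := by
  induction K with
  | nil => simp
  | cons k K ih =>
    simp only [List.flatMap_cons]
    rw [List.pairwise_append]
    refine ⟨List.pairwise_replicate.mpr (Or.inr (le_refl k)), ih h.of_cons, ?_⟩
    intro a ha b hb
    obtain ⟨j, hj, hbj⟩ := List.mem_flatMap.mp hb
    have hak : a = k := List.eq_of_mem_replicate ha
    have hbj' : b = j := List.eq_of_mem_replicate hbj
    have hkj := (List.pairwise_cons.mp h).1 j hj
    subst hak hbj'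
    exact le_of_lt hkj

theorem solution_eq_alt (diet breakfast lunch : String) :
    solution diet breakfast lunch = solution_alt diet breakfast lunch := by
  unfold solution solution_alt
  dsimp only
  set dietL := diet.toList with hdietL
  set food : PySem.Set Char := PySem.Set.ofList (breakfast.toList ++ lunch.toList) with hfood
  have hnd : food.Nodup := PySem.Set.nodup_ofList _
  by_cases hsub : ∀ f ∈ food, f ∈ dietL
  · -- both take the non-CHEATER branch
    have hsubset : food.issubset (PySem.Set.ofList dietL) = true := by
      rw [PySem.Set.issubset_iff]
      intro x hx
      exact (PySem.Set.mem_ofList _ _).mpr (hsub x hx)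
    obtain ⟨r, hloop, hcnt⟩ := solutionLoop_eq_some food dietL hnd hsub
    rw [hloop, if_pos hsubset]
    dsimp only
    set counts : PySem.Dict Char Int :=
      dietL.foldl (fun d c => d.insert c (d.getD c 0 + 1)) PySem.Dict.empty with hcounts
    set counts2 : PySem.Dict Char Int :=
      food.foldl (fun d c => d.insert c (d.getD c 0 - 1)) counts with hcounts2
    have hkeys : counts2.keys = PySem.Set.ofList dietL := by
      rw [hcounts2, PySem.Dict.keys_foldl_insert, hcounts, PySem.Dict.keys_foldl_insert]
      have h1 : (PySem.Dict.empty : PySem.Dict Char Int).keys = [] := by simp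
      rw [h1]
      have h2 : PySem.Set.update ([] : PySem.Set Char) dietL = PySem.Set.ofList dietL := rfl
      rw [h2]
      exact set_update_of_subset _ _ (fun x hx => (PySem.Set.mem_ofList _ _).mpr (hsub x hx))
    have hval : ∀ c, counts2.getD c 0 =
        (dietL.count c : Int) - (if c ∈ food then 1 else 0) := by
      intro c
      rw [hcounts2, getD_foldl_insert_sub_one, hcounts,
        PySem.Dict.getD_foldl_insert_add_one, hnd.count (a := c)]
      simp
    rw [hkeys]
    set K := PySem.List.sorted (PySem.Set.ofList dietL) (fun c => c) with hK
    have hKlt : K.Pairwise (· < ·) := PySem.List.sorted_ofList_pairwise_lt dietL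
    have hKnd : K.Nodup := hKlt.imp (fun h => ne_of_lt h)
    have hKmem : ∀ c, c ∈ K ↔ c ∈ dietL := by
      intro c
      rw [hK, (PySem.List.sorted_perm _ _ _).mem_iff, PySem.Set.mem_ofList]
    congr 1
    rw [PySem.Chars.join_nil_singletons]
    have hrep : (K.map (fun c => PySem.List.pyRepeat [c] (counts2.getD c 0))) =
        K.map (fun c => List.replicate (counts2.getD c 0).toNat c) := by
      simp [PySem.List.pyRepeat_singleton]
    rw [hrep, join_nil_eq_flatten, ← List.flatMap_def]
    set m : Char → Nat := fun c => (counts2.getD c 0).toNat with hm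
    apply PySem.List.sorted_id_eq_of_perm_of_pairwise
    · apply List.perm_iff_count.mpr
      intro c
      rw [count_flatMap_replicate K m hKnd c, hcnt c]
      have hm' : m c = ((dietL.count c : Int) - if c ∈ food then 1 else 0).toNat := by
        rw [hm]
        dsimp only
        rw [hval c]
      by_cases hcD : c ∈ dietL
      · rw [if_pos ((hKmem c).mpr hcD), hm']
        by_cases hcF : c ∈ food
        · have h1 : 1 ≤ dietL.count c := List.one_le_count_iff.mpr hcD
          simp only [if_pos hcF]
          omega
        · simp [hcF]
      · have h1 : c ∉ K := fun h => hcD ((hKmem c).mp h)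
        have h0 : dietL.count c = 0 := List.count_eq_zero.mpr hcD
        have hcF : c ∉ food := fun h => hcD (hsub c h)
        rw [if_neg h1]
        simp [h0, hcF]
    · exact pairwise_flatMap_replicate K m hKlt
  · have hsubset : ¬ food.issubset (PySem.Set.ofList dietL) = true := by
      rw [PySem.Set.issubset_iff]
      intro hall
      exact hsub (fun f hf => (PySem.Set.mem_ofList _ _).mp (hall f hf))
    rw [solutionLoop_eq_none food dietL hnd hsub, if_neg hsubset]

-- ===== VERDICT (by name: the statement is the Claim_ definition above) =====
theorem solution_spec : Claim_equal_solution := by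
  intro diet breakfast lunch _
  exact solution_eq_alt diet breakfast lunch
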